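-- pv_equiv track=rewrite | github.com/jimboid/Longbow | Longbow/apps/lammps.py | sub_dict
-- ===== SOURCE A (Python) =====
-- def sub_dict(args):
--     '''
--     Function to detect substitutions specified on the commandline.
--     '''
--
--     removelist = []
--     sub = {}
--
--     for index, item in enumerate(args):
--
--         if item == "-var" or item == "-v":
--
--             sub[args[index + 1]] = args[index + 2]
--             removelist.append(item)
--             removelist.append(args[index + 1])
--             removelist.append(args[index + 2])
--
--     for item in removelist:
--
--         args.remove(item)
--
--     return sub
-- ===== SOURCE B (Python) =====
-- def sub_dict(args):
--     '''
--     Function to detect substitutions specified on the commandline.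
--     '''
--
--     sub = {}
--     kept = []
--     i = 0
--     n = len(args)
--
--     while i < n:
--
--         item = args[i]
--
--         if item == "-var" or item == "-v":
--
--             sub[args[i + 1]] = args[i + 2]
--             i += 3
--
--         else:
--
--             kept.append(item)
--             i += 1
--
--     args[:] = kept
--
--     return sub
-- ===== Notes on version B (the rewrite author's own statement) =====
-- stated objective: alternative
-- what changed: Replaced A's two-phase design (collect a removelist while scanning, then call args.remove once per collected token) by a single while-loop pass that records each -var/-v substitution, skips its three tokens, and rebuilds args once.
import Mathlib
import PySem

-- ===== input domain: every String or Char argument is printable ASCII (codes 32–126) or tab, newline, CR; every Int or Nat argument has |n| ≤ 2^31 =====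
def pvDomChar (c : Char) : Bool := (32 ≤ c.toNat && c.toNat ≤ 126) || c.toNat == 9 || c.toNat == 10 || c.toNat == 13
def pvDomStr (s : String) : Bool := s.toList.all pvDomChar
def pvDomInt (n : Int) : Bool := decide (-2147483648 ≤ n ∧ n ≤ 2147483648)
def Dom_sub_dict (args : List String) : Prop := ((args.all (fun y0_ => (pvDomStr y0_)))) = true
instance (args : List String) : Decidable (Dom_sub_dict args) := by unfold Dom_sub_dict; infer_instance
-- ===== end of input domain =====

-- B replaces A's two-phase flag-scan + removelist/args.remove design by a single while-loop
-- pass that collects the substitutions, skips their tokens and rebuilds args without them;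
-- equivalence is about the RETURN value only
-- (both remove the substitution tokens from args in place, but when a substitution token
-- duplicates an earlier kept argument the residual args may differ in order).

-- shared token test (the literal 'item == "-var" or item == "-v"')
def pvIsFlag (s : String) : Bool := s == "-var" || s == "-v"

-- ===== PORT A =====
-- first loop: fold over enumerate(args) accumulating (sub, removelist);
-- args[index+1] / args[index+2] via pyGet? (IndexError = none, excluded by Pre_, '.getD ""' never reached inside Pre_)
def subDictStepA (args : List String)
    (st : PySem.Dict String String × List String) (p : Int × String) :
    PySem.Dict String String × List String :=
  if pvIsFlag p.2 then
    let k := (PySem.List.pyGet? args (p.1 + 1)).getD ""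
    let v := (PySem.List.pyGet? args (p.1 + 2)).getD ""
    (st.1.insert k v, st.2 ++ [p.2, k, v])
  else st

def sub_dict (args : List String) : List (String × String) :=
  let r := (PySem.List.enumerate args).foldl (subDictStepA args) (PySem.Dict.empty, [])
  -- second loop: 'for item in removelist: args.remove(item)' — mutation of the local list only
  -- (ValueError = none, excluded by Pre_); it does not touch the returned dict
  let _ := r.2.foldl (fun a it => (PySem.List.remove? a it).getD a) args
  r.1.items

-- ===== PORT B =====
-- single pass: while i < n, record substitution and skip 3, else keep the token and advance 1
def subDictAltLoop (args : List String) (i : Nat)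
    (sub : PySem.Dict String String) (kept : List String) :
    PySem.Dict String String × List String :=
  if h : i < args.length then
    if pvIsFlag args[i] then
      subDictAltLoop args (i + 3)
        (sub.insert ((PySem.List.pyGet? args ((i : Int) + 1)).getD "")
                    ((PySem.List.pyGet? args ((i : Int) + 2)).getD "")) kept
    else
      subDictAltLoop args (i + 1) sub (kept ++ [args[i]])
  else (sub, kept)
termination_by args.length - i

def sub_dict_alt (args : List String) : List (String × String) :=
  (subDictAltLoop args 0 PySem.Dict.empty []).1.items

-- ===== PRECONDITION & SPEC =====
-- Pre_ excludes exactly the inputs on which the Python A raises: a "-var"/"-v" without two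
-- following arguments (IndexError), or a "-var"/"-v" whose two following arguments contain
-- another flag token (the removal loop then raises ValueError).
def Pre_sub_dict (args : List String) : Prop :=
  ∀ i < args.length, pvIsFlag (args.getD i "") = true →
    i + 2 < args.length ∧ pvIsFlag (args.getD (i + 1) "") = false ∧
      pvIsFlag (args.getD (i + 2) "") = false
instance (args : List String) : Decidable (Pre_sub_dict args) := by
  unfold Pre_sub_dict; infer_instance

def pvWitness_sub_dict : List String := ["-v", "x", "1", "in.lammps"]

def Spec_sub_dict (args : List String) (out : List (String × String)) : Prop := out = sub_dict_alt args
instance (args : List String) (out : List (String × String)) : Decidable (Spec_sub_dict args out) := by unfold Spec_sub_dict; infer_instance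

-- ===== CLAIM (what is proved, stated in full; the proofs are below) =====
def Claim_equal_sub_dict : Prop := ∀ (args : List String), Dom_sub_dict args → Pre_sub_dict args → Spec_sub_dict args (sub_dict args)

-- ===== LEMMAS AND PROOFS =====

-- A's fold, dict component only (the removelist does not influence the dict)
def subDictStepA1 (args : List String) (d : PySem.Dict String String) (p : Int × String) :
    PySem.Dict String String :=
  if pvIsFlag p.2 then
    d.insert ((PySem.List.pyGet? args (p.1 + 1)).getD "")
             ((PySem.List.pyGet? args (p.1 + 2)).getD "")
  else d

lemma fst_foldA (args : List String) (l : List (Int × String))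
    (d : PySem.Dict String String) (r : List String) :
    (l.foldl (subDictStepA args) (d, r)).1 = l.foldl (subDictStepA1 args) d := by
  induction l generalizing d r with
  | nil => rfl
  | cons p t ih =>
      simp only [List.foldl_cons, subDictStepA, subDictStepA1]
      split <;> exact ih _ _

-- main invariant: A's fold over the enumerate suffix from i equals B's loop from i
lemma main_loop (args : List String) (hpre : Pre_sub_dict args) :
    ∀ fuel i d kept, args.length ≤ i + fuel →
    (PySem.List.enumerate (List.drop i args) (i : Int)).foldl (subDictStepA1 args) d
      = (subDictAltLoop args i d kept).1 := by
  intro fuel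
  induction fuel with
  | zero =>
      intro i d kept hle
      rw [List.drop_eq_nil_of_le (by omega), PySem.List.enumerate_nil,
        subDictAltLoop, dif_neg (by omega)]
      rfl
  | succ m ih =>
      intro i d kept hle
      by_cases h : i < args.length
      · have hdrop : List.drop i args = args[i] :: List.drop (i + 1) args :=
          List.drop_eq_getElem_cons h
        rw [hdrop, PySem.List.enumerate_cons, List.foldl_cons]
        rw [subDictAltLoop, dif_pos h]
        by_cases hf : pvIsFlag args[i]
        · -- flag: insert, and the next two positions are non-flags
          have hgd : args.getD i "" = args[i] := List.getD_eq_getElem args "" h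
          obtain ⟨h2, hnf1, hnf2⟩ := hpre i h (by rw [hgd]; exact hf)
          have h1 : i + 1 < args.length := by omega
          have hnf1' : pvIsFlag args[i + 1] = false := by
            rw [← List.getD_eq_getElem args "" h1]; exact hnf1
          have hnf2' : pvIsFlag args[i + 2] = false := by
            rw [← List.getD_eq_getElem args "" h2]; exact hnf2
          have hd1 : List.drop (i + 1) args = args[i + 1] :: List.drop (i + 2) args :=
            List.drop_eq_getElem_cons h1
          have hd2 : List.drop (i + 2) args = args[i + 2] :: List.drop (i + 3) args :=
            List.drop_eq_getElem_cons h2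
          rw [hd1, PySem.List.enumerate_cons, List.foldl_cons,
            hd2, PySem.List.enumerate_cons, List.foldl_cons]
          simp only [subDictStepA1, hf, if_true, hnf1', hnf2', Bool.false_eq_true, if_false]
          rw [show ((i : Int) + 1 + 1 + 1) = ((i + 3 : Nat) : Int) by push_cast; ring]
          exact ih (i + 3) _ kept (by omega)
        · -- non-flag: both sides step by one
          have hf' : pvIsFlag args[i] = false := by simpa using hf
          simp only [subDictStepA1, hf', Bool.false_eq_true, if_false]
          rw [show ((i : Int) + 1) = ((i + 1 : Nat) : Int) by push_cast; ring]
          exact ih (i + 1) d (kept ++ [args[i]]) (by omega)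
      · rw [List.drop_eq_nil_of_le (by omega), PySem.List.enumerate_nil,
          subDictAltLoop, dif_neg h]
        rfl

-- ===== VERDICT (by name: the statement is the Claim_ definition above) =====
theorem sub_dict_spec : Claim_equal_sub_dict := by
  intro args _hdom hpre
  unfold Spec_sub_dict sub_dict sub_dict_alt
  have h0 : (PySem.List.enumerate args 0).foldl (subDictStepA1 args) PySem.Dict.empty
      = (subDictAltLoop args 0 PySem.Dict.empty []).1 := by
    have := main_loop args hpre args.length 0 PySem.Dict.empty [] (by omega)
    simpa using this
  simp only [fst_foldA, h0]
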